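-- pv_equiv track=rewrite | github.com/eugen-paul/ProblemsPython | LeetCode/Problems/1000_1999/1400_1499/1420_BuildArrayWhereYouCanFindTheMaximumExactlyKComparisons.py | numOfArrays_s
-- ===== SOURCE A (Python) =====
-- def numOfArrays_s(n: int, m: int, k: int) -> int:
--     """sample solution"""
--     dp = [[[0] * (k + 1) for _ in range(m + 1)] for __ in range(n + 1)]
--     MOD = 10 ** 9 + 7
--
--     for num in range(len(dp[0])):
--         dp[n][num][0] = 1
--
--     for i in range(n - 1, -1, -1):
--         for max_so_far in range(m, -1, -1):
--             for remain in range(k + 1):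
--                 ans = (max_so_far * dp[i + 1][max_so_far][remain]) % MOD
--
--                 if remain > 0:
--                     for num in range(max_so_far + 1, m + 1):
--                         ans = (ans + dp[i + 1][num][remain - 1]) % MOD
--
--                 dp[i][max_so_far][remain] = ans
--
--     return dp[0][0][k]
-- ===== SOURCE B (Python) =====
-- def numOfArrays_s(n: int, m: int, k: int) -> int:
--     """Backward DP in two staged passes per step: first build a suffix-sum table S
--     over the previous layer, then compute the new layer directly from S,
--     removing A's inner rescan: O(n*m*k) instead of O(n*m^2*k)."""
--     MOD = 10 ** 9 + 7
--     cur = [[1] + [0] * k for _ in range(m + 1)]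
--     for _ in range(n):
--         # pass 1: S[j][c] = sum(cur[t][c] for t in range(j, m + 1)) % MOD
--         S = [[0] * (k + 1) for _ in range(m + 2)]
--         for j in range(m, -1, -1):
--             for c in range(k + 1):
--                 S[j][c] = (S[j + 1][c] + cur[j][c]) % MOD
--         # pass 2: new layer read off cur and S
--         cur = [[(j * cur[j][c] + (S[j + 1][c - 1] if c else 0)) % MOD
--                 for c in range(k + 1)] for j in range(m + 1)]
--     return cur[0][k]
-- ===== Notes on version B (the rewrite author's own statement) =====
-- stated objective: faster
-- what changed: B keeps only two DP layers and, per step, first builds a suffix-sum table over the previous layer in one pass and then reads each new cell from it, replacing A's inner rescan of dp[i+1][num][remain-1] for every cell and dropping a factor of m.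
import Mathlib
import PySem

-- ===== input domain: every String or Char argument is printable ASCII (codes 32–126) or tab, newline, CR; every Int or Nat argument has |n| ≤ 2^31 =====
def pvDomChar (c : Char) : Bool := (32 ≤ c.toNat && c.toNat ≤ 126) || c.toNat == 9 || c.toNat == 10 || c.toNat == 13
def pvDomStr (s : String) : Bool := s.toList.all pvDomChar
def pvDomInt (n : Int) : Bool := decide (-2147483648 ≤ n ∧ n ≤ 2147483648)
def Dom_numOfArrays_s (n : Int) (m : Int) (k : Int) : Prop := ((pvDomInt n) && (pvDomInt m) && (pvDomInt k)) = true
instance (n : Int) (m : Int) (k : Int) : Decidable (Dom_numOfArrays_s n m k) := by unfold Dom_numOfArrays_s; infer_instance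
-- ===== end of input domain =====

-- B keeps two DP layers and, per step, first builds a suffix-sum table over the previous
-- layer and then reads each new cell from it, replacing A's inner rescan; measured faster
-- (O(n*m*k) vs O(n*m^2*k)). Python lists are ported as Lean lists read with getD; Python's
-- % has the positive modulus 10^9+7 here, which PySem.Int.mod renders exactly.

def pvMOD : Int := 1000000007

-- ===== PORT A =====
-- reading dp[i+1][j][c] (indices always in range in A)
def aGet (g : List (List Int)) (j c : Nat) : Int := (g.getD j []).getD c 0

-- one cell: ans = (max_so_far * dp[i+1][ms][c]) % MOD, then (if remain > 0) the rescan
-- over num in range(ms+1, m+1)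
def aCell (m : Nat) (prev : List (List Int)) (ms c : Nat) : Int :=
  let ans := PySem.Int.mod ((ms : Int) * aGet prev ms c) pvMOD
  if 0 < c then
    (List.range' (ms + 1) (m - ms)).foldl
      (fun a num => PySem.Int.mod (a + aGet prev num (c - 1)) pvMOD) ans
  else ans

-- one outer layer: for max_so_far in range(m,-1,-1): for remain in range(k+1): write the cell
def aLayer (m k : Nat) (prev : List (List Int)) : List (List Int) :=
  ((List.range (m + 1)).reverse).foldl
    (fun acc ms =>
      ((List.range (k + 1)).foldl (fun row c => row ++ [aCell m prev ms c]) []) :: acc) []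

def numOfArrays_s (n : Int) (m : Int) (k : Int) : Int :=
  let init : List (List Int) :=
    (List.range (m.toNat + 1)).map
      (fun _ => (List.range (k.toNat + 1)).map (fun c => if c = 0 then (1 : Int) else 0))
  let dp0 := (List.range n.toNat).foldl (fun prev _ => aLayer m.toNat k.toNat prev) init
  aGet dp0 0 k.toNat

-- ===== PORT B =====
-- cur[j][c]
def bGet (cur : List (List Int)) (j c : Nat) : Int := (cur.getD j []).getD c 0

-- pass 1, 'for j in range(m,-1,-1)': row S[m+1] is all zeros; each step prepends
-- S[j][c] = (S[j+1][c] + cur[j][c]) % MOD.  bSuf cur k m t = rows S[m+1-t .. m+1].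
def bSuf (cur : List (List Int)) (k m : Nat) : Nat → List (List Int)
  | 0 => [List.replicate (k + 1) (0 : Int)]
  | t + 1 =>
      let rest := bSuf cur k m t
      ((List.range (k + 1)).map
          (fun c => PySem.Int.mod ((rest.headD []).getD c 0 + bGet cur (m - t) c) pvMOD))
        :: rest

-- pass 2: the new layer, read off cur and S
def bLayer (m k : Nat) (cur : List (List Int)) : List (List Int) :=
  let S := bSuf cur k m (m + 1)
  (List.range (m + 1)).map (fun (j : Nat) =>
    (List.range (k + 1)).map (fun (c : Nat) =>
      PySem.Int.mod
        ((j : Int) * bGet cur j c + (if 0 < c then ((S.getD (j + 1) []).getD (c - 1) 0) else 0))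
        pvMOD))

-- 'for _ in range(n)': iterate the step n times starting from the cost-0 layer
def bIter (m k : Nat) : Nat → List (List Int)
  | 0 => (List.range (m + 1)).map (fun _ => (1 : Int) :: List.replicate k (0 : Int))
  | t + 1 => bLayer m k (bIter m k t)

def numOfArrays_s_alt (n : Int) (m : Int) (k : Int) : Int :=
  ((bIter m.toNat k.toNat n.toNat).headD []).getD k.toNat 0

-- ===== PRECONDITION & SPEC =====
-- A raises IndexError when any of n, m, k is negative (some dp dimension is empty); Pre_ excludes exactly those.
def Pre_numOfArrays_s (n : Int) (m : Int) (k : Int) : Prop := 0 ≤ n ∧ 0 ≤ m ∧ 0 ≤ k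
instance (n : Int) (m : Int) (k : Int) : Decidable (Pre_numOfArrays_s n m k) := by unfold Pre_numOfArrays_s; infer_instance
def pvWitness_numOfArrays_s : Int × Int × Int := (2, 3, 1)

def Spec_numOfArrays_s (n : Int) (m : Int) (k : Int) (out : Int) : Prop := out = numOfArrays_s_alt n m k
instance (n : Int) (m : Int) (k : Int) (out : Int) : Decidable (Spec_numOfArrays_s n m k out) := by unfold Spec_numOfArrays_s; infer_instance

-- ===== CLAIM =====
def Claim_equal_numOfArrays_s : Prop := ∀ (n : Int) (m : Int) (k : Int), Dom_numOfArrays_s n m k → Pre_numOfArrays_s n m k → Spec_numOfArrays_s n m k (numOfArrays_s n m k)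

-- ===== LEMMAS AND PROOFS =====

theorem pvMOD_pos : (0 : Int) < pvMOD := by norm_num [pvMOD]

theorem mod_absorb_left (a y : Int) :
    PySem.Int.mod (PySem.Int.mod a pvMOD + y) pvMOD = PySem.Int.mod (a + y) pvMOD := by
  simp only [PySem.Int.mod_eq_emod_of_pos pvMOD_pos]
  conv_rhs => rw [Int.add_emod]
  rw [Int.add_emod (a % pvMOD) y, Int.emod_emod_of_dvd a dvd_rfl]

theorem mod_absorb_right (a y : Int) :
    PySem.Int.mod (a + PySem.Int.mod y pvMOD) pvMOD = PySem.Int.mod (a + y) pvMOD := by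
  rw [add_comm a, mod_absorb_left, add_comm]

-- a foldl of mod-additions is the mod of the plain sum
theorem foldl_mod_add (f : Nat → Int) :
    ∀ (l : List Nat) (a : Int),
      l.foldl (fun acc x => PySem.Int.mod (acc + f x) pvMOD) (PySem.Int.mod a pvMOD)
        = PySem.Int.mod (a + (l.map f).sum) pvMOD := by
  intro l
  induction l with
  | nil => intro a; simp
  | cons x xs ih =>
      intro a
      simp only [List.foldl_cons, List.map_cons, List.sum_cons]
      rw [mod_absorb_left, ih (a + f x), add_assoc]

-- sum of cur[num][c] over num = a .. a+len-1
def sumPrev (prev : List (List Int)) (a len c : Nat) : Int :=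
  ((List.range' a len).map (fun num => aGet prev num c)).sum

theorem sumPrev_zero (prev : List (List Int)) (a c : Nat) : sumPrev prev a 0 c = 0 := rfl

theorem sumPrev_cons (prev : List (List Int)) (a len c : Nat) :
    sumPrev prev a (len + 1) c = aGet prev a c + sumPrev prev (a + 1) len c := by
  simp [sumPrev, List.range'_succ]

-- folding cons over a reversed range builds the map
theorem revfold_cons {α : Type} (g : Nat → α) :
    ∀ (l : List Nat) (init : List α),
      (l.reverse).foldl (fun acc x => g x :: acc) init = l.map g ++ init := by
  intro l
  induction l with
  | nil => intro init; rfl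
  | cons x xs ih =>
      intro init
      rw [List.reverse_cons, List.foldl_append]
      simp only [List.foldl_cons, List.foldl_nil, List.map_cons]
      rw [ih, List.cons_append]

-- A's layer is the map of its cells
theorem aLayer_eq (m k : Nat) (prev : List (List Int)) :
    aLayer m k prev
      = (List.range (m + 1)).map
          (fun ms => (List.range (k + 1)).map (fun c => aCell m prev ms c)) := by
  unfold aLayer
  simp only [PySem.List.foldl_append_singleton_eq_map, List.nil_append]
  rw [revfold_cons (fun ms => (List.range (k + 1)).map (fun c => aCell m prev ms c))
        (List.range (m + 1)) []]
  rw [List.append_nil]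

-- the suffix table: row r of bSuf … t holds the mod-reduced suffix sums from index m+1-t+r
theorem bSuf_eq (prev : List (List Int)) (k m : Nat) :
    ∀ t, t ≤ m + 1 →
      bSuf prev k m t
        = (List.range (t + 1)).map
            (fun r => (List.range (k + 1)).map
              (fun c => PySem.Int.mod (sumPrev prev (m + 1 - t + r) (t - r) c) pvMOD)) := by
  intro t
  induction t with
  | zero =>
      intro _
      simp [bSuf, sumPrev_zero, List.map_const', pvMOD]
  | succ t ih =>
      intro ht
      have ht' : t ≤ m + 1 := Nat.le_of_succ_le ht
      have hidx : m + 1 - (t + 1) = m - t := by omega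
      rw [show bSuf prev k m (t + 1)
            = ((List.range (k + 1)).map
                (fun c => PySem.Int.mod
                  (((bSuf prev k m t).headD []).getD c 0 + bGet prev (m - t) c) pvMOD))
              :: bSuf prev k m t from rfl]
      rw [ih ht']
      rw [show List.range (t + 1 + 1) = 0 :: (List.range (t + 1)).map Nat.succ from List.range_succ_eq_map]
      rw [List.map_cons, List.map_map]
      congr 1
      · -- new head row
        have hhead : (((List.range (t + 1)).map
              (fun r => (List.range (k + 1)).map
                (fun c => PySem.Int.mod (sumPrev prev (m + 1 - t + r) (t - r) c) pvMOD))).headD [])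
            = (List.range (k + 1)).map
                (fun c => PySem.Int.mod (sumPrev prev (m + 1 - t) t c) pvMOD) := by
          rw [show List.range (t + 1) = 0 :: (List.range t).map Nat.succ from List.range_succ_eq_map, List.map_cons]
          simp
        rw [hhead]
        apply List.map_congr_left
        intro c hc
        rw [List.mem_range] at hc
        rw [PySem.List.getD_map_range _ _ _ _ hc, mod_absorb_left]
        rw [hidx, Nat.add_zero, Nat.sub_zero, sumPrev_cons]
        have h1 : m + 1 - t = m - t + 1 := by omega
        rw [h1, add_comm]
        rfl
      · -- old rows shifted by one
        apply List.map_congr_left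
        intro r hr
        rw [List.mem_range] at hr
        simp only [Function.comp, Nat.succ_eq_add_one]
        have e1 : m + 1 - (t + 1) + (r + 1) = m + 1 - t + r := by omega
        have e2 : t + 1 - (r + 1) = t - r := by omega
        simp only [e1, e2]

-- the two layers agree
theorem layer_eq (m k : Nat) (prev : List (List Int)) :
    aLayer m k prev = bLayer m k prev := by
  rw [aLayer_eq]
  unfold bLayer
  apply List.map_congr_left
  intro j hj
  apply List.map_congr_left
  intro c hc
  rw [List.mem_range] at hj hc
  have hS := bSuf_eq prev k m (m + 1) (le_refl _)
  unfold aCell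
  by_cases hcpos : 0 < c
  · simp only [hcpos, if_true]
    rw [foldl_mod_add (fun num => aGet prev num (c - 1)) (List.range' (j + 1) (m - j))
        ((j : Int) * aGet prev j c)]
    rw [hS, PySem.List.getD_map_range _ _ _ _ (show j + 1 < m + 1 + 1 from by omega),
        PySem.List.getD_map_range _ _ _ _ (show c - 1 < k + 1 from by omega)]
    rw [mod_absorb_right]
    show PySem.Int.mod ((j : Int) * aGet prev j c + sumPrev prev (j + 1) (m - j) (c - 1)) pvMOD
        = PySem.Int.mod
            ((j : Int) * bGet prev j c + sumPrev prev (m + 1 - (m + 1) + (j + 1)) (m + 1 - (j + 1)) (c - 1)) pvMOD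
    congr 3
    · omega
    · omega
  · simp only [hcpos, if_false, add_zero]
    rfl

-- the iterated layers agree (A's foldl over range n vs B's recursion)
theorem iter_eq (m k : Nat) :
    ∀ N, (List.range N).foldl
        (fun prev _ => aLayer m k prev)
        ((List.range (m + 1)).map
          (fun _ => (List.range (k + 1)).map (fun c => if c = 0 then (1 : Int) else 0)))
      = bIter m k N := by
  intro N
  induction N with
  | zero =>
      simp only [List.range_zero, List.foldl_nil, bIter]
      apply List.map_congr_left
      intro _ _
      rw [show List.range (k + 1) = 0 :: (List.range k).map Nat.succ from List.range_succ_eq_map, List.map_cons]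
      rw [List.map_map,
        show ((fun c => if c = 0 then (1 : Int) else 0) ∘ Nat.succ) = (fun _ => (0 : Int)) from
          funext (fun x => by simp)]
      simp [List.map_const']
  | succ N ih =>
      rw [show List.range (N + 1) = List.range N ++ [N] from List.range_succ, List.foldl_append, ih]
      simp only [List.foldl_cons, List.foldl_nil]
      rw [layer_eq]
      rfl

-- ===== VERDICT =====
theorem headD_eq_getD (l : List (List Int)) : l.headD [] = l.getD 0 [] := by
  cases l <;> rfl

theorem numOfArrays_s_spec : Claim_equal_numOfArrays_s := by
  intro n m k _ _
  unfold Spec_numOfArrays_s numOfArrays_s numOfArrays_s_alt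
  show aGet ((List.range n.toNat).foldl (fun prev _ => aLayer m.toNat k.toNat prev)
      ((List.range (m.toNat + 1)).map
        (fun _ => (List.range (k.toNat + 1)).map (fun c => if c = 0 then (1 : Int) else 0)))) 0 k.toNat
    = ((bIter m.toNat k.toNat n.toNat).headD []).getD k.toNat 0
  rw [iter_eq, headD_eq_getD]
  rfl
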